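-- pv_equiv track=rewrite | github.com/BissalMuni/gangubuy-tax-revised | process_manual.py | compute_groups
-- ===== SOURCE A (Python) =====
-- def compute_groups(boundaries: list[int], total_pages: int) -> list[tuple[int, int, int]]:
--     """경계 목록에서 (그룹번호, 시작페이지, 끝페이지) 리스트 계산
--
--     Args:
--         boundaries: 섹션 경계 페이지 번호 리스트 (정렬됨)
--         total_pages: PDF 총 페이지 수
--
--     Returns:
--         [(group_num, start_page, end_page), ...]
--     """
--     groups = []
--     for i, start in enumerate(boundaries):
--         if i + 1 < len(boundaries):
--             end = boundaries[i + 1] - 1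
--         else:
--             end = total_pages
--         groups.append((i + 1, start, end))
--     return groups
-- ===== SOURCE B (Python) =====
-- def compute_groups(boundaries: list[int], total_pages: int) -> list[tuple[int, int, int]]:
--     """Right-to-left sweep: walk boundaries in reverse carrying the current end page
--     (initially total_pages); each emitted start lowers the end to start - 1.
--     Then reverse and number the groups."""
--     spans = []
--     end = total_pages
--     for start in reversed(boundaries):
--         spans.append((start, end))
--         end = start - 1
--     spans.reverse()
--     return [(i + 1, s, e) for i, (s, e) in enumerate(spans)]
-- ===== Notes on version B (the rewrite author's own statement) =====
-- stated objective: alternative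
-- what changed: B sweeps the boundaries right-to-left carrying the current end page as an accumulator (end := start - 1 after each emit), then reverses and numbers the spans, instead of A's forward loop that looks ahead at boundaries[i+1]; no lookahead or length test is needed.
import Mathlib
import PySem

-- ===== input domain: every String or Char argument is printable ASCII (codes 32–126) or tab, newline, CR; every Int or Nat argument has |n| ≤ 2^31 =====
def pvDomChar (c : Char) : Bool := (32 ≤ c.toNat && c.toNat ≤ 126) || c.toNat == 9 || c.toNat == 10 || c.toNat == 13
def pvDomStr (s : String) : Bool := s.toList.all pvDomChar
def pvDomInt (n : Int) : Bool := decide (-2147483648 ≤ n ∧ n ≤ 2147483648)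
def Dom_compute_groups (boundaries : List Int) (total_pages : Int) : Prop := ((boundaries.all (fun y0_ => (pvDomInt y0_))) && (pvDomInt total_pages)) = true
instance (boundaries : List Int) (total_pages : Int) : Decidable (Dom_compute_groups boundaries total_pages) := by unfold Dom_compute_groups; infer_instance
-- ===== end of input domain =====

-- B sweeps the boundaries right-to-left carrying the current end page as an accumulator, then reverses and numbers the spans (alternative decomposition; same O(n) cost).
-- ===== PORT A =====
def compute_groups (boundaries : List Int) (total_pages : Int) : List (Int × Int × Int) :=
  (PySem.List.enumerate boundaries 0).foldl
    (fun groups p =>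
      let i := p.1
      let start := p.2
      let e : Int :=
        if i + 1 < (boundaries.length : Int) then PySem.List.pyGetD boundaries (i + 1) 0 - 1
        else total_pages
      groups ++ [(i + 1, start, e)]) []

-- ===== PORT B =====
def compute_groups_alt (boundaries : List Int) (total_pages : Int) : List (Int × Int × Int) :=
  let st := boundaries.reverse.foldl
    (fun (st : List (Int × Int) × Int) start => (st.1 ++ [(start, st.2)], start - 1))
    ([], total_pages)
  let spans := st.1.reverse
  (PySem.List.enumerate spans 0).map (fun p => (p.1 + 1, p.2.1, p.2.2))

-- ===== PRECONDITION & SPEC =====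
def Spec_compute_groups (boundaries : List Int) (total_pages : Int) (out : List (Int × Int × Int)) : Prop := out = compute_groups_alt boundaries total_pages
instance (boundaries : List Int) (total_pages : Int) (out : List (Int × Int × Int)) : Decidable (Spec_compute_groups boundaries total_pages out) := by unfold Spec_compute_groups; infer_instance

-- ===== CLAIM (what is proved, stated in full; the proofs are below) =====
def Claim_equal_compute_groups : Prop := ∀ (boundaries : List Int) (total_pages : Int), Dom_compute_groups boundaries total_pages → Spec_compute_groups boundaries total_pages (compute_groups boundaries total_pages)

-- ===== LEMMAS AND PROOFS =====

-- recursive description of B's reverse sweep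
def pvSpans : List Int → Int → List (Int × Int)
  | [], _ => []
  | x :: xs, e => (x, e) :: pvSpans xs (x - 1)

theorem pvSpans_foldl (l : List Int) (acc : List (Int × Int)) (e : Int) :
    (l.foldl (fun (st : List (Int × Int) × Int) start => (st.1 ++ [(start, st.2)], start - 1))
      (acc, e)).1 = acc ++ pvSpans l e := by
  induction l generalizing acc e with
  | nil => simp [pvSpans]
  | cons x xs ih => simp [pvSpans, ih, List.append_assoc]

theorem pvSpans_length (l : List Int) (e : Int) : (pvSpans l e).length = l.length := by
  induction l generalizing e with
  | nil => rfl
  | cons x xs ih => simp [pvSpans, ih]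

theorem pvSpans_getElem (l : List Int) (e : Int) (k : Nat) (hk : k < l.length) :
    (pvSpans l e)[k]'(by rw [pvSpans_length]; exact hk)
      = (l[k], if k = 0 then e else l[k - 1]'(by omega) - 1) := by
  induction l generalizing e k with
  | nil => exact absurd hk (by simp)
  | cons x xs ih =>
    cases k with
    | zero => simp [pvSpans]
    | succ k =>
      simp only [pvSpans, List.getElem_cons_succ]
      rw [ih (x - 1) k (by simpa using hk)]
      cases k with
      | zero => simp
      | succ k => simp

theorem compute_groups_eq_alt (boundaries : List Int) (total_pages : Int) :
    compute_groups boundaries total_pages = compute_groups_alt boundaries total_pages := by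
  unfold compute_groups compute_groups_alt
  rw [PySem.List.foldl_append_singleton_eq_map]
  simp only [pvSpans_foldl, List.nil_append]
  apply List.ext_getElem
  · simp [PySem.List.length_enumerate, pvSpans_length]
  · intro k h1 h2
    have hk : k < boundaries.length := by
      simpa [PySem.List.length_enumerate] using h1
    have hks : k < (pvSpans boundaries.reverse total_pages).length := by
      rw [pvSpans_length]; simpa using hk
    rw [List.getElem_map, PySem.List.getElem_enumerate, List.getElem_map,
      PySem.List.getElem_enumerate, List.getElem_reverse]
    rw [pvSpans_getElem boundaries.reverse total_pages _ (by
      simp only [pvSpans_length, List.length_reverse] at hks ⊢; omega)]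
    simp only [pvSpans_length, List.length_reverse, List.getElem_reverse, zero_add]
    by_cases hlast : k + 1 < boundaries.length
    · have h0 : ¬ (boundaries.length - 1 - k = 0) := by omega
      have e1 : boundaries.length - 1 - (boundaries.length - 1 - k) = k := by omega
      have e2 : boundaries.length - 1 - (boundaries.length - 1 - k - 1) = k + 1 := by omega
      have hc : (k : Int) + 1 < (boundaries.length : Int) := by exact_mod_cast hlast
      simp only [e1, e2, if_neg h0, if_pos hc]
      rw [show ((k : Int) + 1) = ((k + 1 : Nat) : Int) by push_cast; ring,
        PySem.List.pyGetD_ofNat _ _ _ hlast]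
    · have h0 : boundaries.length - 1 - k = 0 := by omega
      have e1 : boundaries.length - 1 - 0 = k := by omega
      have hc : ¬ ((k : Int) + 1 < (boundaries.length : Int)) := by exact_mod_cast hlast
      simp only [h0, e1, if_neg hc, if_true]

-- ===== VERDICT (by name: the statement is the Claim_ definition above) =====
theorem compute_groups_spec : Claim_equal_compute_groups := by
  intro boundaries total_pages _
  unfold Spec_compute_groups
  exact compute_groups_eq_alt boundaries total_pages
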